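-- pv_equiv track=rewrite | github.com/sagikel/Backtracking-sudoku | sudoku.py | return_k_subsets_helper
-- ===== SOURCE A (Python) =====
-- def return_k_subsets_helper(n, k, index=0):
--     """The function returns all the existing options of a K-length list without
--     the order of appearance of the numbers in n"""
--     list_of_lists = []
--     if k == index:
--         return [[]]
--     for j in range(n):
--         one_option_list = return_k_subsets_helper(n, k, index + 1)
--         for lst in one_option_list:
--             lst.append(j)
--         list_of_lists += one_option_list
--     return list_of_lists
-- ===== SOURCE B (Python) =====
-- def return_k_subsets_helper(n, k, index=0):
--     """Iterative bottom-up build: start from the single empty list and, for each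
--     of the k-index remaining positions, extend every list with each value j;
--     stop early once the result is empty (n <= 0)."""
--     result = [[]]
--     for _ in range(k - index):
--         result = [lst + [j] for j in range(n) for lst in result]
--         if not result:
--             break
--     return result
-- ===== Notes on version B (the rewrite author's own statement) =====
-- stated objective: simpler
-- what changed: Replaces A's n-way recursion (which re-runs the whole recursive call and mutates its sublists for each j) with a single bottom-up loop that starts from [[]] and k-index times extends every list with every value j via a comprehension.
-- outside the precondition, e.g. on return_k_subsets_helper(0, 0, 1): A returns [], B returns [[]]
import Mathlib
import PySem

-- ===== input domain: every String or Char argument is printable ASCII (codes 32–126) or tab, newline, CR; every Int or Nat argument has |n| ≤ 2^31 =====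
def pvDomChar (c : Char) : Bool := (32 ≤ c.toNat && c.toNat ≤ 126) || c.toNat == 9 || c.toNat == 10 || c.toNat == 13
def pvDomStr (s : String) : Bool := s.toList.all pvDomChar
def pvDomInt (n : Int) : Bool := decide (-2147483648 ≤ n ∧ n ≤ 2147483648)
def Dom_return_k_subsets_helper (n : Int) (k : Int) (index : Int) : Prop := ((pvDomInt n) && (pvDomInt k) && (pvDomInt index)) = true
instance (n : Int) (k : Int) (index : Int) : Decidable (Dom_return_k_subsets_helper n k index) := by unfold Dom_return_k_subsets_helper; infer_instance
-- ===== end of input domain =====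

-- B replaces A's recursion with an iterative bottom-up product loop (objective: simpler).


-- ===== PORT A =====
-- Literal port of A's recursion; the Nat fuel only makes the recursion total
-- (inside Pre_ the fuel (k-index).toNat+1 is exactly enough and is never exhausted).
def return_k_subsets_helper_fuel : Nat → Int → Int → Int → List (List Int)
  | 0, _, _, _ => []
  | Nat.succ f, n, k, index =>
    if k = index then [[]]
    else
      (PySem.List.pyRange 0 n 1).foldl
        (fun list_of_lists j =>
          list_of_lists ++
            ((return_k_subsets_helper_fuel f n k (index + 1)).map (fun lst => lst ++ [j])))
        []

def return_k_subsets_helper (n : Int) (k : Int) (index : Int) : List (List Int) :=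
  return_k_subsets_helper_fuel ((k - index).toNat + 1) n k index

-- ===== PORT B =====
-- The Nat counter is len(range(k - index)); the 'if result = []' branch is Source B's break.
def return_k_subsets_helper_alt_loop : Nat → Int → List (List Int) → List (List Int)
  | 0, _, result => result
  | Nat.succ m, n, result =>
    let result' :=
      (PySem.List.pyRange 0 n 1).flatMap (fun j => result.map (fun lst => lst ++ [j]))
    if result' = [] then result' else return_k_subsets_helper_alt_loop m n result'

def return_k_subsets_helper_alt (n : Int) (k : Int) (index : Int) : List (List Int) :=
  return_k_subsets_helper_alt_loop (k - index).toNat n [[]]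

-- ===== PRECONDITION & SPEC =====
-- Pre_ excludes index > k, which lies outside the natural domain of this recursion
-- helper: there A recurses past its base case (RecursionError whenever n > 0, and an
-- accidental [] when n ≤ 0) while B's loop naturally returns [[]].
def Pre_return_k_subsets_helper (n : Int) (k : Int) (index : Int) : Prop := index ≤ k
instance (n : Int) (k : Int) (index : Int) : Decidable (Pre_return_k_subsets_helper n k index) := by unfold Pre_return_k_subsets_helper; infer_instance
def pvWitness_return_k_subsets_helper : Int × Int × Int := (2, 2, 0)
def Spec_return_k_subsets_helper (n : Int) (k : Int) (index : Int) (out : List (List Int)) : Prop := out = return_k_subsets_helper_alt n k index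
instance (n : Int) (k : Int) (index : Int) (out : List (List Int)) : Decidable (Spec_return_k_subsets_helper n k index out) := by unfold Spec_return_k_subsets_helper; infer_instance

-- ===== CLAIM (what is proved, stated in full; the proofs are below) =====
def Claim_equal_return_k_subsets_helper : Prop := ∀ (n : Int) (k : Int) (index : Int), Dom_return_k_subsets_helper n k index → Pre_return_k_subsets_helper n k index → Spec_return_k_subsets_helper n k index (return_k_subsets_helper n k index)

-- ===== LEMMAS AND PROOFS =====

/-- One extension step of B's loop. -/
def pvStep (n : Int) (result : List (List Int)) : List (List Int) :=
  (PySem.List.pyRange 0 n 1).flatMap (fun j => result.map (fun lst => lst ++ [j]))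

lemma pv_fuel_eq_iterate (d : Nat) (n k index : Int) (hd : k - index = (d : Int)) :
    return_k_subsets_helper_fuel (d + 1) n k index = (pvStep n)^[d] [[]] := by
  induction d generalizing index with
  | zero =>
    have : k = index := by omega
    simp [return_k_subsets_helper_fuel, this]
  | succ d ih =>
    have hne : k ≠ index := by omega
    have hrec : return_k_subsets_helper_fuel (d + 1) n k (index + 1) = (pvStep n)^[d] [[]] :=
      ih (index + 1) (by omega)
    rw [return_k_subsets_helper_fuel, if_neg hne]
    rw [PySem.List.foldl_append_eq_flatMap]
    rw [hrec, Function.iterate_succ_apply']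
    simp [pvStep]

lemma pv_iterate_nil (n : Int) (m : Nat) : (pvStep n)^[m] [] = [] := by
  induction m with
  | zero => rfl
  | succ m ih =>
    rw [Function.iterate_succ_apply]
    have h : pvStep n [] = [] := by simp [pvStep]
    rw [h]; exact ih

lemma pv_altLoop_eq_iterate (m : Nat) (n : Int) (r : List (List Int)) :
    return_k_subsets_helper_alt_loop m n r = (pvStep n)^[m] r := by
  induction m generalizing r with
  | zero => rfl
  | succ m ih =>
    rw [return_k_subsets_helper_alt_loop, Function.iterate_succ_apply]
    by_cases h : pvStep n r = []
    · simp only [pvStep] at h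
      rw [if_pos h]
      simp only [pvStep]
      rw [h, pv_iterate_nil]
    · simp only [pvStep] at h
      rw [if_neg h]
      exact ih _

-- ===== VERDICT (by name: the statement is the Claim_ definition above) =====
theorem return_k_subsets_helper_spec : Claim_equal_return_k_subsets_helper := by
  intro n k index _ hpre
  unfold Spec_return_k_subsets_helper return_k_subsets_helper return_k_subsets_helper_alt
  have hd : k - index = ((k - index).toNat : Int) := by
    unfold Pre_return_k_subsets_helper at hpre; omega
  rw [pv_fuel_eq_iterate ((k - index).toNat) n k index hd, pv_altLoop_eq_iterate]
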